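-- pv_equiv track=rewrite | github.com/leoduville/Recuperacion-de-la-Informacion | TP 4/EJ 7/E7.py | decode_elias_gamma
-- ===== SOURCE A (Python) =====
-- def binary_list_to_decimal(binary_list):
--     pos = len(binary_list)
--     num = 0
--     for binary in binary_list:
--         num += binary * 2 ** pos
--         pos -= 1
--     return num
--
-- def decode_elias_gamma(bits):
--     decoded_numbers = []
--     count_zeros = 0
--     bandera = False
--     num = []
--     for bit in bits:
--         if bandera and count_zeros != 0:
--             num.append(bit)
--             count_zeros -= 1
--         if not bandera:
--             if bit == 0:
--                 count_zeros += 1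
--             if bit == 1:
--                 count = count_zeros
--                 bandera = True
--         if bandera and count_zeros == 0:
--             num_final = 2 ** count + binary_list_to_decimal(num)
--             decoded_numbers.append(num_final)
--             count = 0
--             bandera = False
--             num = []
--     return decoded_numbers
-- ===== SOURCE B (Python) =====
-- def _skip_to_one(bs):
--     z = 0
--     for j, b in enumerate(bs):
--         if b == 1:
--             return z, bs[j + 1:]
--         if b == 0:
--             z += 1
--     return z, None
--
-- def _value(z, payload):
--     v = 2 ** z
--     p = z
--     for b in payload:
--         v += b * 2 ** p
--         p -= 1
--     return v
--
-- def decode_elias_gamma(bits):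
--     bs = list(bits)
--     out = []
--     while True:
--         z, rest = _skip_to_one(bs)
--         if rest is None or len(rest) < z:
--             return out
--         out.append(_value(z, rest[:z]))
--         bs = rest[z:]
-- ===== Notes on version B (the rewrite author's own statement) =====
-- stated objective: alternative
-- what changed: Replaces A's single-pass flag/counter state machine (bandera, count_zeros, an accumulating num list) by a per-codeword reader: skip to the first 1 counting zeros z, slice off the next z payload bits, compute the value directly, repeat on the remainder.
import Mathlib
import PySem

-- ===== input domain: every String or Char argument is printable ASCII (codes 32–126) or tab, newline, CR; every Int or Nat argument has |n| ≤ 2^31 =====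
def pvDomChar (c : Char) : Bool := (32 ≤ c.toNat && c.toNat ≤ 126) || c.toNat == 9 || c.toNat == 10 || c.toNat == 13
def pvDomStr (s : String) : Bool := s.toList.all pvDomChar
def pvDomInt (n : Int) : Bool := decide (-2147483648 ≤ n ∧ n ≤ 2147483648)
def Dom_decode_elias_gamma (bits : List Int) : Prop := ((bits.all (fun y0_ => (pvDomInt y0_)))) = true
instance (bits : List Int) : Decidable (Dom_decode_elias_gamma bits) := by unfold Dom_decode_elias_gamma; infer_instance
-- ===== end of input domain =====

-- B replaces A's one-pass flag/counter state machine by a per-codeword reader (skip zeros,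
-- then slice off the payload) — same return value, a plainer decomposition (objective: alternative).

-- ===== PORT A =====
def binary_list_to_decimal (binary_list : List Int) : Int :=
  (binary_list.foldl (fun (s : Int × Nat) b => (s.1 + b * (2 : Int) ^ s.2, s.2 - 1))
    (0, binary_list.length)).1

-- one iteration of A's for-loop; state = (decoded_numbers, count_zeros, bandera, num, count)
def stepA (s : List Int × Nat × Bool × List Int × Nat) (bit : Int) :
    List Int × Nat × Bool × List Int × Nat :=
  match s with
  | (dec, cz, band, num, count) =>
    let num' := if band && (cz != 0) then num ++ [bit] else num
    let cz1 := if band && (cz != 0) then cz - 1 else cz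
    let cz2 := if !band && (bit == 0) then cz1 + 1 else cz1
    let band' := if !band && (bit == 1) then true else band
    let count' := if !band && (bit == 1) then cz2 else count
    if band' && (cz2 == 0) then
      (dec ++ [2 ^ count' + binary_list_to_decimal num'], cz2, false, [], 0)
    else
      (dec, cz2, band', num', count')

def decode_elias_gamma (bits : List Int) : List Int :=
  (bits.foldl stepA ([], 0, false, [], 0)).1

-- ===== PORT B =====
-- scan to the first 1, counting the 0s passed; return the tail after the 1 (none if no 1)
def skipToOne : Nat → List Int → Nat × Option (List Int)
  | z, [] => (z, none)
  | z, b :: bs => if b == 1 then (z, some bs) else skipToOne (if b == 0 then z + 1 else z) bs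

lemma skipToOne_len : ∀ (bs : List Int) (z0 z : Nat) (rest : List Int),
    skipToOne z0 bs = (z, some rest) → rest.length < bs.length := by
  intro bs
  induction bs with
  | nil => intro z0 z rest h; simp [skipToOne] at h
  | cons b bs ih =>
    intro z0 z rest h
    by_cases hb : b == 1
    · simp [skipToOne, hb] at h
      simp [h.2.symm]
    · simp [skipToOne, hb] at h
      exact Nat.lt_trans (ih _ _ _ h) (Nat.lt_succ_self _)

def valueB (z : Nat) (payload : List Int) : Int :=
  (payload.foldl (fun (s : Int × Nat) b => (s.1 + b * (2 : Int) ^ s.2, s.2 - 1))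
    ((2 : Int) ^ z, z)).1

def decodeLoop (out : List Int) (bs : List Int) : List Int :=
  match _h : skipToOne 0 bs with
  | (_, none) => out
  | (z, some rest) =>
    if rest.length < z then out
    else decodeLoop (out ++ [valueB z (rest.take z)]) (rest.drop z)
termination_by bs.length
decreasing_by
  have := skipToOne_len bs 0 z rest _h
  simp only [List.length_drop]
  omega

def decode_elias_gamma_alt (bits : List Int) : List Int := decodeLoop [] bits

-- ===== PRECONDITION & SPEC =====
def Spec_decode_elias_gamma (bits : List Int) (out : List Int) : Prop := out = decode_elias_gamma_alt bits
instance (bits : List Int) (out : List Int) : Decidable (Spec_decode_elias_gamma bits out) := by unfold Spec_decode_elias_gamma; infer_instance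

-- ===== CLAIM (what is proved, stated in full; the proofs are below) =====
def Claim_equal_decode_elias_gamma : Prop := ∀ (bits : List Int), Dom_decode_elias_gamma bits → Spec_decode_elias_gamma bits (decode_elias_gamma bits)

-- ===== LEMMAS AND PROOFS =====

-- decodeLoop generalized over pending leading zeros
def G (out : List Int) (cz : Nat) (bs : List Int) : List Int :=
  match skipToOne cz bs with
  | (_, none) => out
  | (z, some rest) =>
    if rest.length < z then out
    else decodeLoop (out ++ [valueB z (rest.take z)]) (rest.drop z)

lemma G_none (out : List Int) (cz : Nat) (bs : List Int) (z : Nat)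
    (h : skipToOne cz bs = (z, none)) : G out cz bs = out := by
  unfold G; rw [h]

lemma G_some (out : List Int) (cz : Nat) (bs : List Int) (z : Nat) (rest : List Int)
    (h : skipToOne cz bs = (z, some rest)) :
    G out cz bs = if rest.length < z then out
      else decodeLoop (out ++ [valueB z (rest.take z)]) (rest.drop z) := by
  unfold G; rw [h]

lemma decodeLoop_eq_G (out bs) : decodeLoop out bs = G out 0 bs := by
  rw [decodeLoop.eq_def]
  split
  next z h => exact (G_none _ _ _ _ h).symm
  next z rest h => exact (G_some _ _ _ _ _ h).symm

lemma fold_shift : ∀ (l : List Int) (a c : Int) (p : Nat),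
    (l.foldl (fun (s : Int × Nat) b => (s.1 + b * (2 : Int) ^ s.2, s.2 - 1)) (a + c, p)).1
    = a + (l.foldl (fun (s : Int × Nat) b => (s.1 + b * (2 : Int) ^ s.2, s.2 - 1)) (c, p)).1 := by
  intro l
  induction l with
  | nil => intro a c p; simp
  | cons b l ih =>
    intro a c p
    simp only [List.foldl_cons]
    have := ih a (c + b * (2 : Int) ^ p) (p - 1)
    rw [show a + c + b * (2 : Int) ^ p = a + (c + b * (2 : Int) ^ p) by ring]
    exact this

lemma valueB_eq (z : Nat) (l : List Int) (h : l.length = z) :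
    valueB z l = 2 ^ z + binary_list_to_decimal l := by
  unfold valueB binary_list_to_decimal
  rw [h, show ((2 : Int) ^ z) = (2 : Int) ^ z + 0 by ring, fold_shift]
  ring

lemma main_all : ∀ n : Nat,
    (∀ bs : List Int, bs.length ≤ n → ∀ (dec : List Int) (cz : Nat),
      (bs.foldl stepA (dec, cz, false, [], 0)).1 = G dec cz bs) ∧
    (∀ rest : List Int, rest.length ≤ n → ∀ (dec num : List Int) (count cz : Nat), 0 < cz →
      (rest.foldl stepA (dec, cz, true, num, count)).1 =
        if rest.length < cz then dec
        else decodeLoop (dec ++ [2 ^ count + binary_list_to_decimal (num ++ rest.take cz)])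
          (rest.drop cz)) := by
  intro n
  induction n with
  | zero =>
    constructor
    · intro bs hlen dec cz
      have : bs = [] := List.length_eq_zero_iff.mp (Nat.le_zero.mp hlen)
      subst this
      simp [G, skipToOne]
    · intro rest hlen dec num count cz hcz
      have : rest = [] := List.length_eq_zero_iff.mp (Nat.le_zero.mp hlen)
      subst this
      simp [hcz]
  | succ n ih =>
    constructor
    · -- skip phase
      intro bs hlen dec cz
      cases bs with
      | nil => simp [G, skipToOne]
      | cons b bs' =>
        have hlen' : bs'.length ≤ n := by simpa using hlen
        by_cases hb1 : b = 1
        · subst hb1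
          by_cases hcz : cz = 0
          · subst hcz
            have hstep : stepA (dec, 0, false, [], 0) 1
                = (dec ++ [2 ^ 0 + binary_list_to_decimal []], 0, false, [], 0) := by
              simp [stepA]
            rw [List.foldl_cons, hstep, ih.1 bs' hlen']
            have hv : valueB 0 ([] : List Int) = 2 ^ 0 + binary_list_to_decimal [] :=
              valueB_eq 0 [] rfl
            have hrhs : G dec 0 (1 :: bs')
                = decodeLoop (dec ++ [2 ^ 0 + binary_list_to_decimal []]) bs' := by
              rw [G]
              simp only [skipToOne, beq_self_eq_true, if_true, Nat.not_lt_zero,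
                List.take_zero, List.drop_zero, hv]
              simp
            rw [hrhs, decodeLoop_eq_G]
          · have hstep : stepA (dec, cz, false, [], 0) 1 = (dec, cz, true, [], cz) := by
              simp [stepA, hcz]
            rw [List.foldl_cons, hstep, ih.2 bs' hlen' dec [] cz cz (Nat.pos_of_ne_zero hcz)]
            simp only [G, skipToOne]
            simp only [beq_self_eq_true, if_true]
            by_cases hrl : bs'.length < cz
            · simp [hrl]
            · have htk : (bs'.take cz).length = cz := by
                simp [List.length_take]; omega
              simp [hrl, valueB_eq cz (bs'.take cz) htk]
        · have hstep : stepA (dec, cz, false, [], 0)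
              b = (dec, (if b == 0 then cz + 1 else cz), false, [], 0) := by
            by_cases hb0 : b = 0 <;> simp [stepA, hb0, hb1]
          rw [List.foldl_cons, hstep, ih.1 bs' hlen']
          simp only [G]
          rw [show skipToOne cz (b :: bs')
              = skipToOne (if b == 0 then cz + 1 else cz) bs' by
            simp [skipToOne, hb1]]
    · -- collect phase
      intro rest hlen dec num count cz hcz
      cases rest with
      | nil => simp [hcz]
      | cons b rest' =>
        have hlen' : rest'.length ≤ n := by simpa using hlen
        have hczne : (cz != 0) = true := by simp; omega
        by_cases h1 : cz = 1
        · subst h1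
          have hstep : stepA (dec, 1, true, num, count) b
              = (dec ++ [2 ^ count + binary_list_to_decimal (num ++ [b])], 0, false, [], 0) := by
            simp [stepA]
          rw [List.foldl_cons, hstep, ih.1 rest' hlen', decodeLoop_eq_G]
          simp [List.take_succ_cons]
        · have hcz2 : 0 < cz - 1 := by omega
          have hstep : stepA (dec, cz, true, num, count) b
              = (dec, cz - 1, true, num ++ [b], count) := by
            simp only [stepA, hczne, Bool.true_and, if_true]
            have : (cz - 1 == 0) = false := by simp; omega
            simp [this]
          rw [List.foldl_cons, hstep, ih.2 rest' hlen' dec (num ++ [b]) count (cz - 1) hcz2]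
          have hczeq : cz = (cz - 1) + 1 := by omega
          rw [hczeq, List.take_succ_cons, List.drop_succ_cons]
          by_cases hrl : rest'.length < cz - 1
          · simp [hrl]
          · simp [hrl]

-- ===== VERDICT (by name: the statement is the Claim_ definition above) =====
theorem decode_elias_gamma_spec : Claim_equal_decode_elias_gamma := by
  intro bits _
  unfold Spec_decode_elias_gamma decode_elias_gamma decode_elias_gamma_alt
  rw [(main_all bits.length).1 bits (Nat.le_refl _) [] 0, decodeLoop_eq_G]
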